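-- pv_equiv track=rewrite | github.com/ChristianF88/cookie_cutter_python_package | {{cookiecutter.package_name}}/{{cookiecutter.package_name}}/utils/config.py | is_indented
-- ===== SOURCE A (Python) =====
-- def is_indented(expr):
--     indented = False
--     found = ""
--     for char in expr:
--         if found:
--             if char == "\n":
--                 if found == "=":
--                     found = char
--                     indented = True
--                 else:
--                     return False
--             elif char == "=":
--                 if found == "\n":
--                     found = char
--                     indented = True
--                 else:
--                     return False
--         else:
--             if char == "=" or char == "\n":
--                 found = char
--
--     return indented
-- ===== SOURCE B (Python) =====
-- def is_indented(expr):
--     filtered = [c for c in expr if c in ('=', '\n')]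
--     if len(filtered) < 2:
--         return False
--     start = filtered[0]
--     other = '\n' if start == '=' else '='
--     pattern = [start if i % 2 == 0 else other for i in range(len(filtered))]
--     return filtered == pattern
-- ===== Notes on version B (the rewrite author's own statement) =====
-- stated objective: alternative
-- what changed: Replaces A's streaming state machine (found/indented flags) by constructing the canonical alternating pattern of the same length starting with the first relevant character and comparing the filtered relevant characters against it wholesale.
import Mathlib
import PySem

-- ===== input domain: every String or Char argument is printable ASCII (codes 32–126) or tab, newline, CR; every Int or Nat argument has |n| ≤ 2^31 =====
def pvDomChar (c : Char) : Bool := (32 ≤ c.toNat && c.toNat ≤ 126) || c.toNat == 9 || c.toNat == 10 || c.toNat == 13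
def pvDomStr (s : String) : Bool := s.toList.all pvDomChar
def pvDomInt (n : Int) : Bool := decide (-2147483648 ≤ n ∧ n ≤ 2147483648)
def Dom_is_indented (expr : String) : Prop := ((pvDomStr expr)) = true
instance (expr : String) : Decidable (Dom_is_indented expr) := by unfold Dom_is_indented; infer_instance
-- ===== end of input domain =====

-- B replaces A's streaming state machine by building the canonical alternating pattern
-- (same length, starting with the first relevant character) and comparing wholesale (alternative decomposition, same cost).

-- ===== PORT A =====
-- the for-loop of A with its two state variables `indented` and `found` ("" / "=" / "\n")
def isIndentedLoopA (l : List Char) (indented : Bool) (found : String) : Bool :=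
  match l with
  | [] => indented
  | c :: rest =>
    if found ≠ "" then
      if c = '\n' then
        (if found = "=" then isIndentedLoopA rest true "\n" else false)
      else if c = '=' then
        (if found = "\n" then isIndentedLoopA rest true "=" else false)
      else isIndentedLoopA rest indented found
    else
      if c = '=' || c = '\n' then isIndentedLoopA rest indented (String.mk [c])
      else isIndentedLoopA rest indented found

def is_indented (expr : String) : Bool := isIndentedLoopA expr.toList false ""

-- ===== PORT B =====
def is_indented_alt (expr : String) : Bool :=
  let filtered := expr.toList.filter (fun c => c = '=' || c = '\n')
  if filtered.length < 2 then false
  else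
    let start := filtered.headD ' '   -- filtered[0]; the branch guarantees filtered ≠ []
    let other := if start = '=' then '\n' else '='
    let pattern := (List.range filtered.length).map (fun i => if i % 2 = 0 then start else other)
    filtered == pattern

-- ===== PRECONDITION & SPEC =====
def Spec_is_indented (expr : String) (out : Bool) : Prop := out = is_indented_alt expr
instance (expr : String) (out : Bool) : Decidable (Spec_is_indented expr out) := by unfold Spec_is_indented; infer_instance

-- ===== CLAIM (what is proved, stated in full; the proofs are below) =====
def Claim_equal_is_indented : Prop := ∀ (expr : String), Dom_is_indented expr → Spec_is_indented expr (is_indented expr)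

-- ===== LEMMAS AND PROOFS =====

-- proof-side helpers: adjacent-distinct scan and the recursive alternating pattern
def pvPairsOk : List (Char × Char) → Bool
  | [] => true
  | (a, b) :: rest => if a = b then false else pvPairsOk rest

def pvAltL (a b : Char) : Nat → List Char
  | 0 => []
  | n + 1 => a :: pvAltL b a n

lemma rangeMap_eq_pvAltL (a b : Char) (n : Nat) :
    (List.range n).map (fun i => if i % 2 = 0 then a else b) = pvAltL a b n := by
  induction n generalizing a b with
  | zero => simp [pvAltL]
  | succ m ih =>
    rw [List.range_succ_eq_map, List.map_cons, List.map_map]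
    have hshift : ((fun i => if i % 2 = 0 then a else b) ∘ Nat.succ) =
        (fun i => if i % 2 = 0 then b else a) := by
      funext i
      simp only [Function.comp, Nat.succ_eq_add_one]
      have h2 : (i + 1) % 2 = 0 ↔ ¬ (i % 2 = 0) := by omega
      by_cases h : i % 2 = 0 <;> simp [h, h2]
    rw [hshift, ih b a]
    simp [pvAltL]

-- once `found` holds a relevant char c, A's loop equals the pairwise check on c :: filter rest
lemma isIndentedLoopA_found (l : List Char) (ind : Bool) (c : Char) (hc : c = '=' ∨ c = '\n') :
    isIndentedLoopA l ind (String.mk [c]) =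
      (pvPairsOk ((c :: l.filter (fun d => d = '=' || d = '\n')).zip
          (l.filter (fun d => d = '=' || d = '\n'))) &&
        (ind || !(l.filter (fun d => d = '=' || d = '\n')).isEmpty)) := by
  induction l generalizing ind c with
  | nil => simp [isIndentedLoopA, pvPairsOk]
  | cons d rest ih =>
    have ihE := fun ind => ih ind '=' (Or.inl rfl)
    have ihN := fun ind => ih ind '\n' (Or.inr rfl)
    rw [show String.mk ['='] = "=" from rfl] at ihE
    rw [show String.mk ['\n'] = "\n" from rfl] at ihN
    rcases hc with h | h <;> subst h <;>
      simp only [show String.mk ['='] = "=" from rfl,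
        show String.mk ['\n'] = "\n" from rfl] <;>
      simp only [isIndentedLoopA]
    · -- found = "="
      by_cases hd : d = '\n'
      · subst hd
        rw [if_pos (show ("=" : String) ≠ "" by decide), if_pos rfl]
        simp [ihN, pvPairsOk, List.filter_cons]
      · by_cases hd2 : d = '='
        · subst hd2
          rw [if_pos (show ("=" : String) ≠ "" by decide), if_neg hd, if_pos rfl]
          simp [pvPairsOk, List.filter_cons]
        · have hf : (fun e => e = '=' || e = '\n') d = false := by simp [hd, hd2]
          rw [if_pos (show ("=" : String) ≠ "" by decide), if_neg hd, if_neg hd2, ihE ind]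
          simp [List.filter_cons, hf]
    · -- found = "\n"
      by_cases hd : d = '\n'
      · subst hd
        rw [if_pos (show ("\n" : String) ≠ "" by decide), if_pos rfl]
        simp [pvPairsOk, List.filter_cons]
      · by_cases hd2 : d = '='
        · subst hd2
          rw [if_pos (show ("\n" : String) ≠ "" by decide), if_neg hd, if_pos rfl]
          simp [ihE, pvPairsOk, List.filter_cons]
        · have hf : (fun e => e = '=' || e = '\n') d = false := by simp [hd, hd2]
          rw [if_pos (show ("\n" : String) ≠ "" by decide), if_neg hd, if_neg hd2, ihN ind]
          simp [List.filter_cons, hf]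

-- the skip phase: A's loop with empty `found` as a pairwise-adjacency check on the filtered list
lemma isIndentedLoopA_start (l : List Char) :
    isIndentedLoopA l false "" =
      (pvPairsOk ((l.filter (fun d => d = '=' || d = '\n')).zip
          (l.filter (fun d => d = '=' || d = '\n')).tail) &&
        decide (2 ≤ (l.filter (fun d => d = '=' || d = '\n')).length)) := by
  induction l with
  | nil => simp [isIndentedLoopA, pvPairsOk]
  | cons c rest ih =>
    simp only [isIndentedLoopA]
    rw [if_neg (show ¬(("" : String) ≠ "") by decide)]
    by_cases hc : (c = '=' || c = '\n') = true
    · have hc' : c = '=' ∨ c = '\n' := by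
        rcases Bool.or_eq_true_iff.mp hc with h | h
        · exact Or.inl (of_decide_eq_true h)
        · exact Or.inr (of_decide_eq_true h)
      rw [if_pos hc, isIndentedLoopA_found rest false c hc']
      have hf : (fun e => e = '=' || e = '\n') c = true := hc
      simp only [List.filter_cons, hf, if_pos rfl, List.tail_cons, Bool.false_or,
        List.length_cons]
      congr 1
      cases rest.filter (fun d => d = '=' || d = '\n') <;> simp
    · have hf : (fun e => e = '=' || e = '\n') c = false := by simpa using hc
      rw [if_neg (by simpa using hc)]
      simp only [List.filter_cons, hf]
      exact ih

-- the bridge: adjacent-distinct over an {a,b}-valued list = equality with the alternating pattern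
lemma pairsOk_eq_altL (l : List Char) (a b : Char) (hab : a ≠ b)
    (hl : ∀ c ∈ l, c = a ∨ c = b) :
    pvPairsOk ((a :: l).zip l) = decide (l = pvAltL b a l.length) := by
  induction l generalizing a b with
  | nil => simp [pvPairsOk, pvAltL]
  | cons c rest ih =>
    simp only [List.zip_cons_cons, pvPairsOk, List.length_cons, pvAltL]
    rcases hl c (by simp) with h | h
    · subst h
      rw [if_pos rfl]
      have hne : ¬ (c :: rest = b :: pvAltL c b rest.length) := by
        intro h; exact hab (List.cons_eq_cons.mp h).1
      simp [hne]
    · subst h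
      rw [if_neg hab,
        ih c a (fun h => hab h.symm) (fun d hd => (hl d (by simp [hd])).symm)]
      simp

-- ===== VERDICT (by name: the statement is the Claim_ definition above) =====
theorem is_indented_spec : Claim_equal_is_indented := by
  intro expr _
  unfold Spec_is_indented is_indented is_indented_alt
  rw [isIndentedLoopA_start]
  cases hF : expr.toList.filter (fun c => c = '=' || c = '\n') with
  | nil => simp
  | cons h rest =>
    have hmem : h = '=' ∨ h = '\n' := by
      have : h ∈ expr.toList.filter (fun c => c = '=' || c = '\n') := by rw [hF]; simp
      have := List.of_mem_filter this
      rcases Bool.or_eq_true_iff.mp this with h' | h'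
      · exact Or.inl (of_decide_eq_true h')
      · exact Or.inr (of_decide_eq_true h')
    have hrest : ∀ c ∈ rest, c = h ∨ c = (if h = '=' then '\n' else '=') := by
      intro c hc
      have : c ∈ expr.toList.filter (fun c => c = '=' || c = '\n') := by rw [hF]; simp [hc]
      have hco := List.of_mem_filter this
      rcases hmem with h' | h' <;> subst h' <;>
        rcases Bool.or_eq_true_iff.mp hco with h'' | h'' <;>
          simp_all [of_decide_eq_true h'']
    have hab : h ≠ (if h = '=' then '\n' else '=') := by
      rcases hmem with h' | h' <;> subst h' <;> decide
    simp only [List.tail_cons, List.headD_cons, List.length_cons]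
    rw [pairsOk_eq_altL rest h (if h = '=' then '\n' else '=') hab hrest,
      rangeMap_eq_pvAltL]
    cases rest with
    | nil => simp [pvAltL]
    | cons x xs =>
      have hlen : ¬ ((x :: xs).length + 1 < 2) := by simp
      have h2le : 2 ≤ (x :: xs).length + 1 := by simp
      rw [if_neg hlen]
      simp only [pvAltL]
      rw [Bool.eq_iff_iff]
      simp only [Bool.and_eq_true, decide_eq_true_eq, beq_iff_eq, List.cons_eq_cons,
        true_and, and_iff_left h2le]
      exact Iff.rfl
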